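-- pv_equiv track=rewrite | github.com/nexon33/voynich-grammar-analysis | scripts/phase4/validate_dor_as_red.py | find_adjacent_words
-- ===== SOURCE A (Python) =====
-- from collections import Counter, defaultdict
--
-- def find_adjacent_words(target, all_words, window=2):
--     """Find words adjacent to target"""
--
--     adjacent = Counter()
--
--     for i, word in enumerate(all_words):
--         if target in word:
--             # Look at neighbors
--             for j in range(max(0, i - window), min(len(all_words), i + window + 1)):
--                 if j != i:
--                     adjacent[all_words[j]] += 1
--
--     return adjacent
-- ===== SOURCE B (Python) =====
-- from collections import Counter, deque
--
--
-- def find_adjacent_words(target, all_words, window=2):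
--     """Find words adjacent to target"""
--     adjacent = Counter()
--     k = max(window, 0)
--     recent = deque(maxlen=k)          # sliding buffer of the last k words seen
--     for i, word in enumerate(all_words):
--         if target in word:
--             adjacent.update(recent)                    # neighbors before i, oldest first
--             adjacent.update(all_words[i + 1:i + 1 + k])  # neighbors after i
--         recent.append(word)
--     return adjacent
-- ===== Notes on version B (the rewrite author's own statement) =====
-- stated objective: alternative
-- what changed: B makes one pass keeping a bounded sliding deque of the last k words (deque(maxlen=k)) and, at each match, bulk-updates the Counter from that buffer and a forward slice, eliminating A's per-match index-range computation with max/min clamping and repeated list indexing.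
import Mathlib
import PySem

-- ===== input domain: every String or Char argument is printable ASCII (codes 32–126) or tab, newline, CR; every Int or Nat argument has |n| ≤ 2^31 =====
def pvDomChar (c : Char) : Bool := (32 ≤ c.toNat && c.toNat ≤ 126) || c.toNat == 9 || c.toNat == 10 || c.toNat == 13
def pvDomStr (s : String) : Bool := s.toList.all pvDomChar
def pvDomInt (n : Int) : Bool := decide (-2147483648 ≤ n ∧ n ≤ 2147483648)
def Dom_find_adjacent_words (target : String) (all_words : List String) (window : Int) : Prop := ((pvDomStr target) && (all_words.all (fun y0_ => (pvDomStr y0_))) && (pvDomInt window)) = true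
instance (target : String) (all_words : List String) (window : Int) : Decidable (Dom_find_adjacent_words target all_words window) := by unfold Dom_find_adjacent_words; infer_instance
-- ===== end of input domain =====

-- B replaces A's per-match index-range loop (max/min clamping + list indexing) by a single pass
-- that maintains a bounded sliding buffer (deque(maxlen=k)) of the preceding words and
-- bulk-updates the Counter from that buffer and a forward slice (objective: alternative; same cost).


-- ===== PORT A =====
def find_adjacent_words (target : String) (all_words : List String) (window : Int) : List (String × Int) :=
  ((PySem.List.enumerate all_words).foldl
    (fun adjacent iw =>
      if PySem.Str.isIn target iw.2 then
        (PySem.List.pyRange (max 0 (iw.1 - window)) (min (all_words.length : Int) (iw.1 + window + 1)) 1).foldl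
          (fun adjacent j =>
            if j != iw.1 then adjacent.modify (PySem.List.pyGetD all_words j "") 0 (· + 1) else adjacent)
          adjacent
      else adjacent)
    (PySem.Dict.empty : PySem.Dict String Int)).items

-- ===== PORT B =====
-- single pass; st = (counter, recent) where recent models deque(maxlen=max(window,0))
def find_adjacent_words_alt (target : String) (all_words : List String) (window : Int) : List (String × Int) :=
  ((PySem.List.enumerate all_words).foldl
    (fun (st : PySem.Dict String Int × List String) iw =>
      ((if PySem.Str.isIn target iw.2 then
          (PySem.List.slice all_words (some (iw.1 + 1)) (some (iw.1 + 1 + max window 0))).foldl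
            (fun d x => d.modify x 0 (· + 1))
            (st.2.foldl (fun d x => d.modify x 0 (· + 1)) st.1)
        else st.1),
       (if ((st.2 ++ [iw.2]).length : Int) > max window 0 then (st.2 ++ [iw.2]).drop 1
        else st.2 ++ [iw.2])))
    ((PySem.Dict.empty : PySem.Dict String Int), ([] : List String))).1.items

-- ===== PRECONDITION & SPEC =====
def Spec_find_adjacent_words (target : String) (all_words : List String) (window : Int) (out : List (String × Int)) : Prop := out = find_adjacent_words_alt target all_words window
instance (target : String) (all_words : List String) (window : Int) (out : List (String × Int)) : Decidable (Spec_find_adjacent_words target all_words window out) := by unfold Spec_find_adjacent_words; infer_instance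

-- ===== CLAIM (what is proved, stated in full; the proofs are below) =====
def Claim_equal_find_adjacent_words : Prop := ∀ (target : String) (all_words : List String) (window : Int), Dom_find_adjacent_words target all_words window → Spec_find_adjacent_words target all_words window (find_adjacent_words target all_words window)

-- ===== LEMMAS AND PROOFS =====

-- a guarded fold is the fold over the filtered, mapped list
theorem pv_foldl_if_filter_map {α β σ : Type} (p : α → Bool) (g : α → β) (f : σ → β → σ) :
    ∀ (l : List α) (init : σ),
      l.foldl (fun s x => if p x then f s (g x) else s) init
        = ((l.filter p).map g).foldl f init := by
  intro l
  induction l with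
  | nil => intro init; rfl
  | cons x xs ih =>
    intro init
    by_cases h : p x
    · simp [h, ih]
    · simp [h, ih]

-- reading an in-bounds index range out of a list is a drop/take
theorem pv_map_range (xs : List String) (a b : Int) (ha : 0 ≤ a) (hb : b ≤ (xs.length : Int)) :
    (PySem.List.pyRange a b 1).map (fun j => PySem.List.pyGetD xs j "")
      = (xs.drop a.toNat).take (b.toNat - a.toNat) := by
  by_cases hab : a ≤ b
  · have hsplit : PySem.List.pyRange a (xs.length : Int) 1
        = PySem.List.pyRange a b 1 ++ PySem.List.pyRange b (xs.length : Int) 1 :=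
      PySem.List.pyRange_one_append a b (xs.length : Int) hab hb
    have h1 : (PySem.List.pyRange a (xs.length : Int) 1).map (fun j => PySem.List.pyGetD xs j "")
        = xs.drop a.toNat := PySem.List.map_pyGetD_pyRange' xs "" ha
    have h2 : (PySem.List.pyRange b (xs.length : Int) 1).map (fun j => PySem.List.pyGetD xs j "")
        = xs.drop b.toNat := PySem.List.map_pyGetD_pyRange' xs "" (le_trans ha hab)
    have hkey : xs.drop a.toNat
        = (PySem.List.pyRange a b 1).map (fun j => PySem.List.pyGetD xs j "") ++ xs.drop b.toNat := by
      rw [← h1, hsplit, List.map_append, h2]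
    have hlen : b.toNat - a.toNat
        = ((PySem.List.pyRange a b 1).map (fun j => PySem.List.pyGetD xs j "")).length := by
      rw [List.length_map, PySem.List.length_pyRange_one]; omega
    rw [hkey, hlen, List.take_left]
  · have hba : b ≤ a := by omega
    rw [PySem.List.pyRange_one_eq_nil hba]
    have : b.toNat - a.toNat = 0 := by omega
    rw [this]
    simp

-- the self-exclusion filter splits the window range at the center
theorem pv_filter_split (n s w : Int) (h0 : 0 ≤ s) (hs : s < n) (hw : 0 < w) :
    (PySem.List.pyRange (max 0 (s - w)) (min n (s + w + 1)) 1).filter (fun j => j != s)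
      = PySem.List.pyRange (max 0 (s - w)) s 1 ++ PySem.List.pyRange (s + 1) (min n (s + w + 1)) 1 := by
  have hlo : max 0 (s - w) ≤ s := by omega
  have hhi : s < min n (s + w + 1) := by omega
  rw [PySem.List.pyRange_one_append (max 0 (s - w)) s (min n (s + w + 1)) hlo (le_of_lt hhi),
      PySem.List.pyRange_one_cons hhi, List.filter_append, List.filter_cons]
  have hself : ((s != s) = true) = False := by simp
  congr 1
  · apply List.filter_eq_self.mpr
    intro j hj
    have hj' := PySem.List.mem_pyRange_one.mp hj
    simp only [bne_iff_ne, ne_eq]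
    omega
  · simp only [bne_self_eq_false, Bool.false_eq_true, if_false]
    apply List.filter_eq_self.mpr
    intro j hj
    have hj' := PySem.List.mem_pyRange_one.mp hj
    simp only [bne_iff_ne, ne_eq]
    omega

-- one deque(maxlen=K) append step on the list model
theorem pv_recent_step (pre : List String) (w : String) (k : Int) (hk : 0 ≤ k) :
    (if ((pre.drop (pre.length - k.toNat) ++ [w]).length : Int) > k
       then (pre.drop (pre.length - k.toNat) ++ [w]).drop 1
       else pre.drop (pre.length - k.toNat) ++ [w])
      = (pre ++ [w]).drop ((pre.length + 1) - k.toNat) := by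
  have hdlen : (pre.drop (pre.length - k.toNat)).length = pre.length - (pre.length - k.toNat) := by
    simp
  by_cases h : k.toNat ≤ pre.length
  · have hcond : (((pre.drop (pre.length - k.toNat) ++ [w]).length : Int) > k) := by
      have hl : (pre.drop (pre.length - k.toNat) ++ [w]).length
          = (pre.length - (pre.length - k.toNat)) + 1 := by simp
      rw [hl]; omega
    rw [if_pos hcond]
    by_cases hK : k.toNat = 0
    · rw [hK]
      simp only [Nat.sub_zero, List.drop_length, List.nil_append, List.drop_one, List.tail_cons]
      symm
      apply List.drop_eq_nil_of_le
      simp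
    · have h1 : 1 ≤ (pre.drop (pre.length - k.toNat)).length := by omega
      rw [List.drop_append_of_le_length h1, List.drop_drop,
          List.drop_append_of_le_length (by omega : pre.length + 1 - k.toNat ≤ pre.length)]
      have he : pre.length - k.toNat + 1 = pre.length + 1 - k.toNat := by omega
      rw [he]
  · have h0 : pre.length - k.toNat = 0 := by omega
    have h1 : pre.length + 1 - k.toNat = 0 := by omega
    rw [h0, h1, List.drop_zero, List.drop_zero]
    have hcond : ¬ (((pre.drop 0 ++ [w]).length : Int) > k) := by
      have hl : (pre.drop 0 ++ [w]).length = pre.length + 1 := by simp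
      rw [hl]; omega
    rw [← List.drop_zero (l := pre), if_neg hcond, List.drop_zero]

theorem pv_take_congr {α : Type} (l : List α) (m n : Nat) (h : min m l.length = min n l.length) :
    l.take m = l.take n := by
  apply List.ext_getElem
  · simp [h]
  · intro i h1 h2; simp

-- the neighbor lists coincide: A's filtered window range reads exactly B's buffer ++ forward slice
theorem pv_neighbors (all_words : List String) (window : Int) (s : Nat) (hs : s < all_words.length) :
    ((PySem.List.pyRange (max 0 ((s : Int) - window)) (min (all_words.length : Int) ((s : Int) + window + 1)) 1).filter
        (fun j => j != (s : Int))).map (fun j => PySem.List.pyGetD all_words j "")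
      = (all_words.take s).drop (s - (max window 0).toNat)
        ++ PySem.List.slice all_words (some ((s : Int) + 1)) (some ((s : Int) + 1 + max window 0)) := by
  have hsn : (s : Int) < (all_words.length : Int) := by exact_mod_cast hs
  rw [PySem.List.slice_toNat all_words (by omega) (by omega)]
  by_cases hw : 0 < window
  · rw [pv_filter_split (all_words.length : Int) (s : Int) window (by omega) hsn hw,
        List.map_append]
    congr 1
    · rw [pv_map_range all_words _ (s : Int) (le_max_left _ _) (by omega),
          List.drop_take]
      have e1 : (max 0 ((s : Int) - window)).toNat = s - (max window 0).toNat := by omega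
      have e2 : ((s : Int)).toNat = s := by omega
      rw [e1, e2]
    · rw [pv_map_range all_words ((s : Int) + 1) _ (by omega) (min_le_left _ _)]
      apply pv_take_congr
      have hl : (all_words.drop ((s : Int) + 1).toNat).length
          = all_words.length - ((s : Int) + 1).toNat := by simp
      rw [hl]
      omega
  · have hmax : max window 0 = 0 := by omega
    have hrec : (all_words.take s).drop (s - (max window 0).toNat) = [] := by
      apply List.drop_eq_nil_of_le
      rw [List.length_take, hmax]
      omega
    have hsl : (all_words.drop ((s : Int) + 1).toNat).take
        (((s : Int) + 1 + max window 0).toNat - ((s : Int) + 1).toNat) = [] := by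
      have : ((s : Int) + 1 + max window 0).toNat - ((s : Int) + 1).toNat = 0 := by omega
      rw [this, List.take_zero]
    rw [hrec, hsl, List.nil_append]
    by_cases h0 : window = 0
    · subst h0
      have hlo : max 0 ((s : Int) - 0) = (s : Int) := by omega
      have hhi : min (all_words.length : Int) ((s : Int) + 0 + 1) = (s : Int) + 1 := by omega
      rw [hlo, hhi, PySem.List.pyRange_one_singleton]
      simp
    · have hle : min (all_words.length : Int) ((s : Int) + window + 1)
          ≤ max 0 ((s : Int) - window) := by omega
      rw [PySem.List.pyRange_one_eq_nil hle]
      simp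

-- main invariant: from position s on, A's fold equals the first component of B's fold,
-- provided B's buffer holds the last ≤K words before s
theorem pv_main (target : String) (all_words : List String) (window : Int) :
    ∀ (suf : List String) (s : Nat) (d : PySem.Dict String Int),
      all_words.drop s = suf →
      (PySem.List.enumerate suf (s : Int)).foldl
          (fun adjacent iw =>
            if PySem.Str.isIn target iw.2 then
              (PySem.List.pyRange (max 0 (iw.1 - window)) (min (all_words.length : Int) (iw.1 + window + 1)) 1).foldl
                (fun adjacent j =>
                  if j != iw.1 then adjacent.modify (PySem.List.pyGetD all_words j "") 0 (· + 1) else adjacent)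
                adjacent
            else adjacent) d
        = ((PySem.List.enumerate suf (s : Int)).foldl
            (fun (st : PySem.Dict String Int × List String) iw =>
              ((if PySem.Str.isIn target iw.2 then
                  (PySem.List.slice all_words (some (iw.1 + 1)) (some (iw.1 + 1 + max window 0))).foldl
                    (fun d x => d.modify x 0 (· + 1))
                    (st.2.foldl (fun d x => d.modify x 0 (· + 1)) st.1)
                else st.1),
               (if ((st.2 ++ [iw.2]).length : Int) > max window 0 then (st.2 ++ [iw.2]).drop 1
                else st.2 ++ [iw.2])))
            (d, (all_words.take s).drop (s - (max window 0).toNat))).1 := by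
  intro suf
  induction suf with
  | nil =>
    intro s d _
    rw [PySem.List.enumerate_nil]
    rfl
  | cons x suf2 ih =>
    intro s d hdrop
    have hs : s < all_words.length := by
      by_contra hge
      rw [Nat.not_lt] at hge
      rw [List.drop_eq_nil_of_le hge] at hdrop
      simp at hdrop
    have hget : all_words[s]? = some x := by
      have h0 : (all_words.drop s)[0]? = some x := by rw [hdrop]; rfl
      rw [List.getElem?_drop] at h0
      simpa using h0
    have hsuf2 : all_words.drop (s + 1) = suf2 := by
      rw [← List.tail_drop, hdrop]
      rfl
    have htake : all_words.take (s + 1) = all_words.take s ++ [x] := by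
      rw [List.take_add_one, hget]
      rfl
    have hlen : (all_words.take s).length = s := by
      rw [List.length_take]
      omega
    rw [PySem.List.enumerate_cons]
    simp only [List.foldl_cons]
    have hrecent := pv_recent_step (all_words.take s) x (max window 0) (le_max_right _ _)
    rw [hlen, ← htake] at hrecent
    have hstep :
        (if PySem.Str.isIn target x then
          (PySem.List.slice all_words (some ((s : Int) + 1)) (some ((s : Int) + 1 + max window 0))).foldl
            (fun d x => d.modify x 0 (fun v => v + 1))
            (((all_words.take s).drop (s - (max window 0).toNat)).foldl
              (fun d x => d.modify x 0 (fun v => v + 1)) d)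
        else d)
        = (if PySem.Str.isIn target x then
            (PySem.List.pyRange (max 0 ((s : Int) - window)) (min (all_words.length : Int) ((s : Int) + window + 1)) 1).foldl
              (fun adjacent j =>
                if j != (s : Int) then adjacent.modify (PySem.List.pyGetD all_words j "") 0 (fun v => v + 1) else adjacent)
              d
          else d) := by
      by_cases hm : PySem.Str.isIn target x
      · rw [if_pos hm, if_pos hm, ← List.foldl_append, ← pv_neighbors all_words window s hs,
            ← pv_foldl_if_filter_map]
      · rw [if_neg hm, if_neg hm]
    have hcast : ((s : Int) + 1) = ((s + 1 : Nat) : Int) := by omega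
    rw [hstep, hrecent, hcast]
    exact ih (s + 1) _ hsuf2

-- ===== VERDICT (by name: the statement is the Claim_ definition above) =====
theorem find_adjacent_words_spec : Claim_equal_find_adjacent_words := by
  intro target all_words window _
  unfold Spec_find_adjacent_words find_adjacent_words find_adjacent_words_alt
  have h := pv_main target all_words window all_words 0 PySem.Dict.empty (by simp)
  simp only [Nat.cast_zero, List.take_zero, List.drop_zero, Nat.zero_sub] at h
  rw [h]
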